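-- pv_equiv track=rewrite | github.com/TurakhiaLab/panman | mat-construction/common2/gfa2panmat.py | seq2int
-- ===== SOURCE A (Python) =====
-- def seq2int( seq ):
--     int_list = list()
--     bin_compact = ""
--     for i in range( len(seq) ):
--         bin = char2bin( seq[i] )
--         bin_compact += bin
--
--         if( len(bin_compact) == 32):
--             dec = int( bin_compact, 2 )
--             bin_compact = ""
--             int_list.append(dec)
--
--         elif ( i == len(seq) - 1):
--             bin_compact =  bin_compact + "0" * (32 - len(bin_compact))
--             dec = int( bin_compact, 2 )
--             bin_compact = ""
--             int_list.append(dec)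
--
--         else:
--             continue
--     return (int_list)
--
-- def char2bin(char):
--     bin = "1111"
--     if ( char == "A" or char == "a"):
--         bin = "0001"
--     elif (char == "C" or char == "c"):
--         bin = "0010"
--     elif (char == "G" or char == "g"):
--         bin = "0100"
--     elif (char == "T" or char == "t"):
--         bin = "1000"
--     elif (char == "R" or char == "r"):
--         bin = "0101"
--     elif (char == "Y" or char == "y"):
--         bin = "1010"
--     elif (char == "S" or char == "s"):
--         bin = "0110"
--     elif (char == "W" or char == "w"):
--         bin = "1001"
--     elif (char == "K" or char == "k"):
--         bin = "1100"
--     elif (char == "M" or char == "m"):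
--         bin = "0011"
--     elif (char == "B" or char == "b"):
--         bin = "1110"
--     elif (char == "D" or char == "d"):
--         bin = "1101"
--     elif (char == "H" or char == "h"):
--         bin = "1011"
--     elif (char == "V" or char == "v"):
--         bin = "0111"
--     else:
--         bin = "1111"
--     return (bin)
-- ===== SOURCE B (Python) =====
-- CODE = {'A': 1, 'a': 1, 'C': 2, 'c': 2, 'G': 4, 'g': 4, 'T': 8, 't': 8,
--         'R': 5, 'r': 5, 'Y': 10, 'y': 10, 'S': 6, 's': 6, 'W': 9, 'w': 9,
--         'K': 12, 'k': 12, 'M': 3, 'm': 3, 'B': 14, 'b': 14, 'D': 13, 'd': 13,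
--         'H': 11, 'h': 11, 'V': 7, 'v': 7}
--
-- def seq2int(seq):
--     out = []
--     for i in range(0, len(seq), 8):
--         val = 0
--         for j, ch in enumerate(seq[i:i+8]):
--             val += CODE.get(ch, 15) * 16 ** (7 - j)
--         out.append(val)
--     return out
-- ===== Notes on version B (the rewrite author's own statement) =====
-- stated objective: alternative
-- what changed: B iterates over 8-character chunks (an index loop with stride 8) and accumulates each 32-bit word by weighting each character's 4-bit code into its positional slot via a code table, replacing A's streaming binary bit-string accumulator with its flush-on-32-bits/flush-on-last-character control flow and per-word int(s, 2) reparsing.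
import Mathlib
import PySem

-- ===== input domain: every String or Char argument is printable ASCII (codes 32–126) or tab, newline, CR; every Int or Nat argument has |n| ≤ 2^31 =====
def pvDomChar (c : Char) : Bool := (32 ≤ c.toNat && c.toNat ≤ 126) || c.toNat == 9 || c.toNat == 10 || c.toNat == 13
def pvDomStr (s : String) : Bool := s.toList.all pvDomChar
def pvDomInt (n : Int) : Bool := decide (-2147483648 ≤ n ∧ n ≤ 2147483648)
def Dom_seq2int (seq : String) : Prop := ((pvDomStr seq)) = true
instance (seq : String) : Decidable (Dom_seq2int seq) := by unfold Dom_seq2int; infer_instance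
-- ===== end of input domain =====

-- B packs the sequence chunk-by-chunk (8 chars per 32-bit word, each 4-bit code weighted into its
-- positional slot) instead of A's streaming bit-string accumulator with flush-on-32/flush-on-last
-- control flow; same exact return value (objective: alternative decomposition).

-- ===== PORT A =====
-- char2bin ported on List Char (Python's 4-character "0"/"1" strings)
def char2bin (c : Char) : List Char :=
  if c = 'A' ∨ c = 'a' then ['0','0','0','1']
  else if c = 'C' ∨ c = 'c' then ['0','0','1','0']
  else if c = 'G' ∨ c = 'g' then ['0','1','0','0']
  else if c = 'T' ∨ c = 't' then ['1','0','0','0']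
  else if c = 'R' ∨ c = 'r' then ['0','1','0','1']
  else if c = 'Y' ∨ c = 'y' then ['1','0','1','0']
  else if c = 'S' ∨ c = 's' then ['0','1','1','0']
  else if c = 'W' ∨ c = 'w' then ['1','0','0','1']
  else if c = 'K' ∨ c = 'k' then ['1','1','0','0']
  else if c = 'M' ∨ c = 'm' then ['0','0','1','1']
  else if c = 'B' ∨ c = 'b' then ['1','1','1','0']
  else if c = 'D' ∨ c = 'd' then ['1','1','0','1']
  else if c = 'H' ∨ c = 'h' then ['1','0','1','1']
  else if c = 'V' ∨ c = 'v' then ['0','1','1','1']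
  else ['1','1','1','1']

-- Hand port of Python's int(s, 2) for THIS call site: bin_compact is always a nonempty string of
-- binary digit characters (a concatenation of char2bin outputs, possibly zero-padded), and on
-- such strings int(s, 2) is exactly the plain base-2 value computed here (no sign, whitespace,
-- underscore or base-prefix case can arise); exact there.
def binToInt (bs : List Char) : Int :=
  bs.foldl (fun a c => 2 * a + (if c = '1' then 1 else 0)) 0

-- A's for-loop over i in range(len(seq)); 'i == len(seq) - 1' is 'the rest after this char is empty'
def seq2intLoop (int_list : List Int) (bin_compact : List Char) : List Char → List Int
  | [] => int_list
  | c :: rest =>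
      let bc := bin_compact ++ char2bin c
      if bc.length = 32 then
        seq2intLoop (int_list ++ [binToInt bc]) [] rest
      else if rest = [] then
        seq2intLoop (int_list ++ [binToInt (bc ++ List.replicate (32 - bc.length) '0')]) [] rest
      else
        seq2intLoop int_list bc rest

def seq2int (seq : String) : List Int := seq2intLoop [] [] seq.toList

-- ===== PORT B =====
def codeDict : PySem.Dict Char Int :=
  PySem.Dict.ofList [('A',1),('a',1),('C',2),('c',2),('G',4),('g',4),('T',8),('t',8),
    ('R',5),('r',5),('Y',10),('y',10),('S',6),('s',6),('W',9),('w',9),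
    ('K',12),('k',12),('M',3),('m',3),('B',14),('b',14),('D',13),('d',13),
    ('H',11),('h',11),('V',7),('v',7)]

-- inner loop: for j, ch in enumerate(chunk): val += CODE.get(ch, 15) * 16 ** (7 - j)
-- (j ≤ 7 always, so the Python exponent 7 - j is a nonnegative int; .toNat is exact here)
def chunkVal (chunk : List Char) : Int :=
  (PySem.List.enumerate chunk 0).foldl
    (fun val p => val + (PySem.Dict.getD codeDict p.2 15) * (16 : Int) ^ ((7 - p.1).toNat)) 0

-- outer loop: for i in range(0, len(seq), 8): out.append(val of the chunk seq[i:i+8])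
def seq2int_alt (seq : String) : List Int :=
  (PySem.List.pyRange 0 (PySem.Str.len seq) 8).foldl
    (fun out i => out ++ [chunkVal (PySem.List.slice seq.toList (some i) (some (i + 8)))]) []

-- ===== PRECONDITION & SPEC =====
def Spec_seq2int (seq : String) (out : List Int) : Prop := out = seq2int_alt seq
instance (seq : String) (out : List Int) : Decidable (Spec_seq2int seq out) := by unfold Spec_seq2int; infer_instance

-- ===== CLAIM (what is proved, stated in full; the proofs are below) =====
def Claim_equal_seq2int : Prop := ∀ (seq : String), Dom_seq2int seq → Spec_seq2int seq (seq2int seq)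

-- ===== LEMMAS AND PROOFS =====

-- the 4-bit code of a character, as A computes it
def codeA (c : Char) : Int := binToInt (char2bin c)

-- reference packer, one char at a time: v is the value of the m codes already in the word
def packFrom (v : Int) (m : Nat) : List Char → List Int
  | [] => []
  | c :: rest =>
      let v' := 16 * v + codeA c
      if m + 1 = 8 then v' :: packFrom 0 0 rest
      else if rest = [] then [v' * 16 ^ (8 - (m + 1))]
      else packFrom v' (m + 1) rest

-- Horner fold over 4-bit codes
def fold16 (a : Int) (l : List Char) : Int := l.foldl (fun a c => 16 * a + codeA c) a

-- every char2bin output has length 4, and B's dict lookup is A's code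
lemma char2bin_master (c : Char) :
    (char2bin c).length = 4 ∧ PySem.Dict.getD codeDict c 15 = binToInt (char2bin c) := by
  by_cases h1 : c = 'A' ∨ c = 'a'
  · rcases h1 with h | h <;> subst h <;> exact ⟨by decide, by decide⟩
  by_cases h2 : c = 'C' ∨ c = 'c'
  · rcases h2 with h | h <;> subst h <;> exact ⟨by decide, by decide⟩
  by_cases h3 : c = 'G' ∨ c = 'g'
  · rcases h3 with h | h <;> subst h <;> exact ⟨by decide, by decide⟩
  by_cases h4 : c = 'T' ∨ c = 't'
  · rcases h4 with h | h <;> subst h <;> exact ⟨by decide, by decide⟩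
  by_cases h5 : c = 'R' ∨ c = 'r'
  · rcases h5 with h | h <;> subst h <;> exact ⟨by decide, by decide⟩
  by_cases h6 : c = 'Y' ∨ c = 'y'
  · rcases h6 with h | h <;> subst h <;> exact ⟨by decide, by decide⟩
  by_cases h7 : c = 'S' ∨ c = 's'
  · rcases h7 with h | h <;> subst h <;> exact ⟨by decide, by decide⟩
  by_cases h8 : c = 'W' ∨ c = 'w'
  · rcases h8 with h | h <;> subst h <;> exact ⟨by decide, by decide⟩
  by_cases h9 : c = 'K' ∨ c = 'k'
  · rcases h9 with h | h <;> subst h <;> exact ⟨by decide, by decide⟩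
  by_cases h10 : c = 'M' ∨ c = 'm'
  · rcases h10 with h | h <;> subst h <;> exact ⟨by decide, by decide⟩
  by_cases h11 : c = 'B' ∨ c = 'b'
  · rcases h11 with h | h <;> subst h <;> exact ⟨by decide, by decide⟩
  by_cases h12 : c = 'D' ∨ c = 'd'
  · rcases h12 with h | h <;> subst h <;> exact ⟨by decide, by decide⟩
  by_cases h13 : c = 'H' ∨ c = 'h'
  · rcases h13 with h | h <;> subst h <;> exact ⟨by decide, by decide⟩
  by_cases h14 : c = 'V' ∨ c = 'v'
  · rcases h14 with h | h <;> subst h <;> exact ⟨by decide, by decide⟩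
  unfold char2bin
  rw [if_neg h1, if_neg h2, if_neg h3, if_neg h4, if_neg h5, if_neg h6, if_neg h7, if_neg h8, if_neg h9, if_neg h10, if_neg h11, if_neg h12, if_neg h13, if_neg h14]
  refine ⟨rfl, ?_⟩
  rw [show codeDict = PySem.Dict.mk [('A',1),('a',1),('C',2),('c',2),('G',4),('g',4),('T',8),('t',8),('R',5),('r',5),('Y',10),('y',10),('S',6),('s',6),('W',9),('w',9),('K',12),('k',12),('M',3),('m',3),('B',14),('b',14),('D',13),('d',13),('H',11),('h',11),('V',7),('v',7)] from by decide]
  simp only [PySem.Dict.getD_eq_get?_getD, PySem.Dict.get?_mk_cons]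
  push Not at h1 h2 h3 h4 h5 h6 h7 h8 h9 h10 h11 h12 h13 h14
  simp [beq_iff_eq, Ne.symm h1.1, Ne.symm h1.2, Ne.symm h2.1, Ne.symm h2.2, Ne.symm h3.1, Ne.symm h3.2, Ne.symm h4.1, Ne.symm h4.2, Ne.symm h5.1, Ne.symm h5.2, Ne.symm h6.1, Ne.symm h6.2, Ne.symm h7.1, Ne.symm h7.2, Ne.symm h8.1, Ne.symm h8.2, Ne.symm h9.1, Ne.symm h9.2, Ne.symm h10.1, Ne.symm h10.2, Ne.symm h11.1, Ne.symm h11.2, Ne.symm h12.1, Ne.symm h12.2, Ne.symm h13.1, Ne.symm h13.2, Ne.symm h14.1, Ne.symm h14.2, PySem.Dict.get?]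
  decide

lemma binToInt_aux (a : Int) (l : List Char) :
    l.foldl (fun a c => 2 * a + (if c = '1' then 1 else 0)) a
      = a * 2 ^ l.length + binToInt l := by
  induction l generalizing a with
  | nil => simp [binToInt]
  | cons c l ih =>
      simp only [List.foldl_cons, List.length_cons, binToInt]
      rw [ih, ih (2 * 0 + if c = '1' then 1 else 0)]
      ring

lemma binToInt_append (xs ys : List Char) :
    binToInt (xs ++ ys) = binToInt xs * 2 ^ ys.length + binToInt ys := by
  unfold binToInt
  rw [List.foldl_append, binToInt_aux]
  rfl

lemma binToInt_replicate_zero (n : Nat) : binToInt (List.replicate n '0') = 0 := by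
  induction n with
  | zero => rfl
  | succ n ih => simpa [List.replicate_succ, binToInt] using ih

lemma fold16_aux (a : Int) (l : List Char) : fold16 a l = a * 16 ^ l.length + fold16 0 l := by
  induction l generalizing a with
  | nil => simp [fold16]
  | cons c l ih =>
      rw [show fold16 a (c :: l) = fold16 (16 * a + codeA c) l from rfl,
          show fold16 0 (c :: l) = fold16 (16 * 0 + codeA c) l from rfl,
          ih, ih (16 * 0 + codeA c), List.length_cons]
      ring

lemma loopA_eq (l : List Char) : ∀ (v : Int) (m : Nat) (acc : List Int) (buf : List Char),
    buf.length = 4 * m → m < 8 → binToInt buf = v → l ≠ [] →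
    seq2intLoop acc buf l = acc ++ packFrom v m l := by
  induction l with
  | nil => intro _ _ _ _ _ _ _ h; exact absurd rfl h
  | cons c rest ih =>
      intro v m acc buf hlen hm hval _
      have hc4 := (char2bin_master c).1
      have hbc : (buf ++ char2bin c).length = 4 * m + 4 := by
        simp [hc4, hlen]
      have hbcv : binToInt (buf ++ char2bin c) = 16 * v + codeA c := by
        rw [binToInt_append, hc4, hval, codeA]; ring
      simp only [seq2intLoop, packFrom, hbc]
      by_cases h8 : m + 1 = 8
      · rw [if_pos (by omega : 4 * m + 4 = 32), if_pos h8]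
        rcases rest with _ | ⟨r, rs⟩
        · simp [seq2intLoop, packFrom, hbcv]
        · rw [ih 0 0 (acc ++ [binToInt (buf ++ char2bin c)]) [] rfl (by omega) rfl (by simp)]
          simp [hbcv, packFrom]
      · rw [if_neg (by omega : ¬ 4 * m + 4 = 32), if_neg h8]
        rcases rest with _ | ⟨r, rs⟩
        · have : binToInt (buf ++ char2bin c ++ List.replicate (32 - (4 * m + 4)) '0')
              = (16 * v + codeA c) * 16 ^ (8 - (m + 1)) := by
            rw [binToInt_append, binToInt_replicate_zero, hbcv, List.length_replicate,
                show 32 - (4 * m + 4) = 4 * (8 - (m + 1)) by omega, pow_mul]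
            norm_num
          simp only [if_true]
          rw [this]
          simp [seq2intLoop]
        · rw [if_neg (by simp : ¬ (r :: rs) = []), if_neg (by simp : ¬ (r :: rs) = [])]
          exact ih (16 * v + codeA c) (m + 1) acc (buf ++ char2bin c) (by omega) (by omega) hbcv (by simp)

lemma packFrom_bridge (l : List Char) : ∀ (v : Int) (m : Nat), m < 8 → l ≠ [] →
    packFrom v m l =
      (if 8 - m ≤ l.length
        then fold16 v (l.take (8 - m))
        else fold16 v l * 16 ^ (8 - m - l.length)) :: packFrom 0 0 (l.drop (8 - m)) := by
  induction l with
  | nil => intro _ _ _ h; exact absurd rfl h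
  | cons c rest ih =>
      intro v m hm _
      simp only [packFrom]
      by_cases h8 : m + 1 = 8
      · rw [if_pos h8]
        have hm7 : m = 7 := by omega
        subst hm7
        simp [fold16]
      · rw [if_neg h8]
        have h1 : 8 - m = (7 - m) + 1 := by omega
        rcases rest with _ | ⟨r, rs⟩
        · rw [if_pos rfl, if_neg (by simp; omega : ¬ 8 - m ≤ (List.cons c []).length)]
          rw [h1]
          simp [fold16, packFrom]
        · rw [if_neg (by simp : ¬ (r :: rs) = [])]
          rw [ih (16 * v + codeA c) (m + 1) (by omega) (by simp)]
          have hsub : 8 - (m + 1) = 7 - m := by omega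
          rw [hsub, h1]
          simp only [List.take_succ_cons, List.drop_succ_cons, List.length_cons]
          have htk : fold16 v (c :: List.take (7 - m) (r :: rs))
              = fold16 (16 * v + codeA c) (List.take (7 - m) (r :: rs)) := rfl
          have hfl : fold16 v (c :: r :: rs) = fold16 (16 * v + codeA c) (r :: rs) := rfl
          by_cases hlen : 7 - m ≤ rs.length + 1
          · rw [if_pos hlen, if_pos (show 7 - m + 1 ≤ rs.length + 1 + 1 by omega), htk]
          · rw [if_neg hlen, if_neg (show ¬ (7 - m + 1 ≤ rs.length + 1 + 1) by omega), hfl,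
                show 7 - m - (rs.length + 1) = 7 - m + 1 - (rs.length + 1 + 1) by omega]

lemma chunkVal_aux (chunk : List Char) : ∀ (a : Int) (j0 : Nat), j0 + chunk.length ≤ 8 →
    (PySem.List.enumerate chunk ((j0 : Nat) : Int)).foldl
      (fun val p => val + (PySem.Dict.getD codeDict p.2 15) * (16 : Int) ^ ((7 - p.1).toNat)) a
      = a + fold16 0 chunk * 16 ^ (8 - j0 - chunk.length) := by
  induction chunk with
  | nil => intro a j0 _; simp [PySem.List.enumerate_nil, fold16]
  | cons c rest ih =>
      intro a j0 hle
      simp only [List.length_cons] at hle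
      rw [PySem.List.enumerate_cons, List.foldl_cons,
          show ((j0 : Nat) : Int) + 1 = (((j0 + 1 : Nat)) : Int) by push_cast; ring,
          ih _ (j0 + 1) (by omega)]
      rw [(char2bin_master c).2, show binToInt (char2bin c) = codeA c from rfl]
      simp only [List.length_cons]
      have ht : ((7 : Int) - (j0 : Nat)).toNat = 7 - j0 := by omega
      rw [ht]
      rw [show fold16 0 (c :: rest) = fold16 (16 * 0 + codeA c) rest from rfl, fold16_aux]
      have he : (7 : Nat) - j0 = rest.length + (8 - (j0 + 1) - rest.length) := by omega
      rw [show (8 : Nat) - j0 - (rest.length + 1) = 8 - (j0 + 1) - rest.length by omega, he, pow_add,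
          fold16_aux (16 * 0 + codeA c) rest]
      ring

lemma chunkVal_eq (chunk : List Char) (h : chunk.length ≤ 8) :
    chunkVal chunk = fold16 0 chunk * 16 ^ (8 - chunk.length) := by
  have := chunkVal_aux chunk 0 0 (by omega)
  simpa [chunkVal] using this

lemma pyRange_eight_cons (a b : Int) (h : a < b) :
    PySem.List.pyRange a b 8 = a :: PySem.List.pyRange (a + 8) b 8 := by
  rw [PySem.List.pyRange_of_pos _ _ (by norm_num : (0:Int) < 8),
      PySem.List.pyRange_of_pos _ _ (by norm_num : (0:Int) < 8), if_pos h]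
  by_cases h2 : a + 8 < b
  · rw [if_pos h2]
    have hn : ((b - a + 8 - 1) / 8).toNat = ((b - (a + 8) + 8 - 1) / 8).toNat + 1 := by omega
    rw [hn, List.range_succ_eq_map]
    simp only [List.map_cons, List.map_map, Nat.cast_zero, mul_zero, add_zero, List.cons.injEq]
    exact ⟨trivial, List.map_congr_left fun x _ => by simp only [Function.comp_apply]; push_cast; ring⟩
  · rw [if_neg h2]
    have hn : ((b - a + 8 - 1) / 8).toNat = 1 := by omega
    simp [hn, List.range_succ]

lemma loopB_eq (ll : List Char) : ∀ (n k : Nat) (out : List Int), ll.length ≤ k + n →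
    (PySem.List.pyRange ((k : Nat) : Int) ((ll.length : Nat) : Int) 8).foldl
      (fun out i => out ++ [chunkVal (PySem.List.slice ll (some i) (some (i + 8)))]) out
    = out ++ packFrom 0 0 (ll.drop k) := by
  intro n
  induction n with
  | zero =>
      intro k out h
      rw [PySem.List.pyRange_of_pos _ _ (by norm_num : (0:Int) < 8),
          if_neg (by exact_mod_cast not_lt.mpr h : ¬ ((k : Int) < (ll.length : Int)))]
      rw [List.drop_eq_nil_of_le (by omega : ll.length ≤ k)]
      simp [packFrom]
  | succ n ihn =>
      intro k out h
      by_cases hk : k < ll.length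
      · rw [pyRange_eight_cons _ _ (by exact_mod_cast hk), List.foldl_cons,
            show ((k : Nat) : Int) + 8 = (((k + 8 : Nat) : Nat) : Int) by push_cast; ring,
            ihn (k + 8) _ (by omega), PySem.List.slice_natCast,
            show k + 8 - k = 8 by omega,
            packFrom_bridge (ll.drop k) 0 0 (by omega)
              (by simp only [ne_eq, List.drop_eq_nil_iff]; omega),
            chunkVal_eq _ (by simp [List.length_take]),
            List.drop_drop]
        simp only [Nat.sub_zero, List.append_assoc, List.cons_append, List.nil_append]
        congr 2
        by_cases h8 : 8 ≤ (ll.drop k).length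
        · rw [if_pos h8, List.length_take, Nat.min_eq_left (by omega)]
          norm_num
        · rw [if_neg h8, List.take_of_length_le (by omega)]
      · rw [PySem.List.pyRange_of_pos _ _ (by norm_num : (0:Int) < 8),
            if_neg (by exact_mod_cast hk : ¬ ((k : Int) < (ll.length : Int)))]
        rw [List.drop_eq_nil_of_le (by omega : ll.length ≤ k)]
        simp [packFrom]

-- ===== VERDICT (by name: the statement is the Claim_ definition above) =====
theorem seq2int_spec : Claim_equal_seq2int := by
  intro seq _
  unfold Spec_seq2int seq2int seq2int_alt
  rw [PySem.Str.len_eq, show (0 : Int) = ((0 : Nat) : Int) from rfl,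
      loopB_eq seq.toList seq.toList.length 0 [] (by omega), List.drop_zero]
  rcases h : seq.toList with _ | ⟨c, rest⟩
  · rfl
  · rw [loopA_eq _ 0 0 [] [] rfl (by omega) rfl (by simp)]
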